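-- pv_equiv track=rewrite | github.com/cycleuser/leetcode | solutions/python3/1040.py | numMovesStonesII
-- ===== SOURCE A (Python) =====
-- from typing import List
--
-- def numMovesStonesII(A: List[int]) -> List[int]:
--     """
--     :param A: 石头的位置列表，整数类型
--     :return: 两个元素的列表，分别表示最少和最多需要移动的次数
--     """
--
--     # 对石头位置进行排序
--     A.sort()
--
--     n = len(A)
--     low, high = n, max(A[-1] - A[0] + 1 - n, A[-2] - A[1] + 1)
--
--     # 初始化滑动窗口的左右边界，low表示最少移动次数，high表示最多移动次数
--     i = 0
--
--     # 滑动窗口右移，找到最少和最多的移动次数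
--     for j in range(n):
--         while A[j] - A[i] >= n:
--             i += 1
--         if j - i + 1 == n - 1 and A[j] - A[i] == n - 2:
--             # 如果窗口内的石头数量为n-1且间隔正好为n-2，则最少移动次数为2
--             low = min(low, 2)
--         else:
--             # 计算最少移动次数
--             low = min(low, n - (j - i + 1))
--
--     return [low, high]
-- ===== SOURCE B (Python) =====
-- from typing import List
--
-- def numMovesStonesII(A: List[int]) -> List[int]:
--     # Different algorithm for low: for each anchor stone, a hand-written binary
--     # search finds the last stone inside the length-n position window starting
--     # there; then a single case analysis on the maximum such count decides low,
--     # inspecting explicitly the only two index windows that can hold n-1 stones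
--     # (A[0..n-2] and A[1..n-1]).  Sorts A in place, exactly like A does.
--     A.sort()
--     n = len(A)
--     high = max(A[-1] - A[0] + 1 - n, A[-2] - A[1] + 1)
--     best = 0
--     for i in range(n):
--         # largest index lo in [i, n-1] with A[lo] <= A[i] + n - 1
--         lo, hi = i, n - 1
--         while lo < hi:
--             mid = (lo + hi + 1) // 2
--             if A[mid] <= A[i] + n - 1:
--                 lo = mid
--             else:
--                 hi = mid - 1
--         c = lo - i + 1
--         if c > best:
--             best = c
--     if best == n:
--         low = 0
--     elif best == n - 1:
--         low = 2
--         if A[n - 2] - A[0] < n and A[n - 2] - A[0] != n - 2: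
--             low = 1
--         if A[n - 1] - A[1] < n and A[n - 1] - A[1] != n - 2:
--             low = 1
--     else:
--         low = n - best
--     return [low, high]
-- ===== Notes on version B (the rewrite author's own statement) =====
-- stated objective: alternative
-- what changed: low is computed by finding, per anchor stone via a hand-written binary search, the last stone inside the length-n position window starting there, and then a single case analysis on the maximum such count (with the only two possible (n-1)-stone index windows inspected explicitly) replaces A's per-window minimum tracking in a right-anchored two-pointer sliding window; sort and the closed-form high are kept.
import Mathlib
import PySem

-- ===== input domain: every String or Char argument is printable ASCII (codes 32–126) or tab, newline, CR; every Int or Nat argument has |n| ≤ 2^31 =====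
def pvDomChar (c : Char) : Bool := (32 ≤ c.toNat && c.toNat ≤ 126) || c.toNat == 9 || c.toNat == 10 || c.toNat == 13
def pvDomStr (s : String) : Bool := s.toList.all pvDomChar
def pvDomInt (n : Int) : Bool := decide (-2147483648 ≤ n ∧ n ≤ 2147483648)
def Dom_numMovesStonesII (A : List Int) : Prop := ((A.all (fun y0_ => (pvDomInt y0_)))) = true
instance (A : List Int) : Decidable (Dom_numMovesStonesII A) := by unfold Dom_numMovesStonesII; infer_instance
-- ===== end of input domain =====

-- B replaces A's right-anchored two-pointer window scan for low by a brute-force count of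
-- stones per anchor window plus ONE case analysis on the maximum count (objective: alternative).
-- Both Pythons sort the argument list in place; the equivalence proved here is about the
-- RETURN value (both perform the identical mutation).

-- ===== PORT A =====
-- the closed-form 'high' line
def highVal (S : List Int) : Int :=
  max (PySem.List.pyGetD S (-1) 0 - PySem.List.pyGetD S 0 0 + 1 - (S.length : Int))
      (PySem.List.pyGetD S (-2) 0 - PySem.List.pyGetD S 1 0 + 1)

-- 'while A[j] - A[i] >= n: i += 1' (fuel bounds the at-most-n increments; never hit under Pre_)
def advA (S : List Int) (n j : Int) : Int → Nat → Int
  | i, 0 => i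
  | i, fuel+1 =>
    if n ≤ PySem.List.pyGetD S j 0 - PySem.List.pyGetD S i 0 then advA S n j (i+1) fuel else i

-- one iteration of A's 'for j in range(n)' loop; state = (i, low)
def stepA (S : List Int) (st : Int × Int) (j : Int) : Int × Int :=
  let i := advA S (S.length : Int) j st.1 S.length
  let low :=
    if j - i + 1 = (S.length : Int) - 1 ∧
       PySem.List.pyGetD S j 0 - PySem.List.pyGetD S i 0 = (S.length : Int) - 2
    then min st.2 2 else min st.2 ((S.length : Int) - (j - i + 1))
  (i, low)

def lowLoopA (S : List Int) : Int :=
  ((PySem.List.pyRange 0 (S.length : Int)).foldl (stepA S) (0, (S.length : Int))).2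

def numMovesStonesII (A : List Int) : List Int :=
  [lowLoopA (PySem.List.sorted A (fun x => x)), highVal (PySem.List.sorted A (fun x => x))]

-- ===== PORT B =====
-- Source B's hand-written binary search: largest index in [lo, hi] whose stone is ≤ A[i]+n-1
-- (fuel bounds the halving steps; never exhausted under Pre_)
def bsearchB (S : List Int) (x : Int) : Int → Int → Nat → Int
  | lo, _hi, 0 => lo
  | lo, hi, fuel+1 =>
    if lo < hi then
      let mid := PySem.Int.floordiv (lo + hi + 1) 2
      if PySem.List.pyGetD S mid 0 ≤ x then bsearchB S x mid hi fuel
      else bsearchB S x lo (mid - 1) fuel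
    else lo

-- the count 'c = lo - i + 1' of Source B's outer loop body at anchor i
def cntLoop (S : List Int) (i : Int) : Int :=
  bsearchB S (PySem.List.pyGetD S i 0 + (S.length : Int) - 1) i ((S.length : Int) - 1)
    S.length - i + 1

-- 'for i in range(n): … if c > best: best = c'
def bestLoop (S : List Int) : Int :=
  (PySem.List.pyRange 0 (S.length : Int)).foldl
    (fun best i => let c := cntLoop S i; if c > best then c else best) 0

-- the if/elif/else chain deciding low from best
def lowB (S : List Int) : Int :=
  let n : Int := (S.length : Int)
  let best := bestLoop S
  if best = n then 0
  else if best = n - 1 then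
    let low : Int := 2
    let low := if PySem.List.pyGetD S (n-2) 0 - PySem.List.pyGetD S 0 0 < n ∧
                  PySem.List.pyGetD S (n-2) 0 - PySem.List.pyGetD S 0 0 ≠ n - 2 then 1 else low
    let low := if PySem.List.pyGetD S (n-1) 0 - PySem.List.pyGetD S 1 0 < n ∧
                  PySem.List.pyGetD S (n-1) 0 - PySem.List.pyGetD S 1 0 ≠ n - 2 then 1 else low
    low
  else n - best

def numMovesStonesII_alt (A : List Int) : List Int :=
  let S := PySem.List.sorted A (fun x => x)
  [lowB S,
   max (PySem.List.pyGetD S (-1) 0 - PySem.List.pyGetD S 0 0 + 1 - (S.length : Int))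
       (PySem.List.pyGetD S (-2) 0 - PySem.List.pyGetD S 1 0 + 1)]

-- ===== PRECONDITION & SPEC =====
-- Both Pythons index the last and second-to-last stone: they raise IndexError on lists with fewer than 2 stones, which Pre_ excludes.
def Pre_numMovesStonesII (A : List Int) : Prop := 2 ≤ A.length
instance (A : List Int) : Decidable (Pre_numMovesStonesII A) := by
  unfold Pre_numMovesStonesII; infer_instance

def pvWitness_numMovesStonesII : List Int := [0, 3]

def Spec_numMovesStonesII (A : List Int) (out : List Int) : Prop := out = numMovesStonesII_alt A
instance (A : List Int) (out : List Int) : Decidable (Spec_numMovesStonesII A out) := by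
  unfold Spec_numMovesStonesII; infer_instance

-- ===== CLAIM (what is proved, stated in full; the proofs are below) =====
def Claim_equal_numMovesStonesII : Prop :=
  ∀ (A : List Int), Dom_numMovesStonesII A → Pre_numMovesStonesII A →
    Spec_numMovesStonesII A (numMovesStonesII A)

-- ===== LEMMAS AND PROOFS =====

-- the candidate value of a window [i..j] of sorted stones (n - count, or 2 in the special case)
def pvFval (S : List Int) (i j : Nat) : Int :=
  if (j:Int) - (i:Int) + 1 = (S.length : Int) - 1 ∧
     S.getD j 0 - S.getD i 0 = (S.length : Int) - 2
  then 2 else (S.length : Int) - ((j:Int) - (i:Int) + 1)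

def pvValid (S : List Int) (i j : Nat) : Prop :=
  i ≤ j ∧ j < S.length ∧ S.getD j 0 - S.getD i 0 < (S.length : Int)

def pvCand (S : List Int) (v : Int) : Prop :=
  v = (S.length : Int) ∨ ∃ i j, pvValid S i j ∧ v = pvFval S i j

def pvGood (S : List Int) (v : Int) : Prop :=
  pvCand S v ∧ v ≤ (S.length : Int) ∧ ∀ i j, pvValid S i j → v ≤ pvFval S i j

lemma pvGood_unique {S : List Int} {a b : Int} (ha : pvGood S a) (hb : pvGood S b) : a = b := by
  obtain ⟨ca, la, lba⟩ := ha
  obtain ⟨cb, lb, lbb⟩ := hb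
  apply le_antisymm
  · rcases cb with h | ⟨i, j, hv, he⟩
    · omega
    · exact he ▸ lba i j hv
  · rcases ca with h | ⟨i, j, hv, he⟩
    · omega
    · exact he ▸ lbb i j hv

-- nested windows: a valid enclosing window never yields a larger candidate value
lemma pvFval_dom {S : List Int} {i1 j1 i2 j2 : Nat}
    (h1 : pvValid S i1 j1) (h12 : i1 ≤ i2) (h22 : i2 ≤ j2) (h21 : j2 ≤ j1) :
    pvFval S i1 j1 ≤ pvFval S i2 j2 := by
  obtain ⟨hij, hjn, _⟩ := h1
  by_cases heq : i1 = i2 ∧ j1 = j2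
  · obtain ⟨h, h'⟩ := heq; subst h; subst h'; exact le_rfl
  · unfold pvFval
    split_ifs <;> omega

lemma pvMono {S : List Int} (hs : S.Pairwise (· ≤ ·)) {p q : Nat}
    (hpq : p ≤ q) (hq : q < S.length) : S.getD p 0 ≤ S.getD q 0 := by
  rcases Nat.lt_or_ge p q with h | h
  · rw [List.getD_eq_getElem _ _ (by omega), List.getD_eq_getElem _ _ hq]
    exact List.pairwise_iff_getElem.mp hs p q (by omega) hq h
  · have : p = q := by omega
    subst this; exact le_refl _

lemma pvGetI {S : List Int} {t : Int} (ht : 0 ≤ t) :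
    PySem.List.pyGetD S t 0 = S.getD t.toNat 0 := by
  conv_lhs => rw [← Int.toNat_of_nonneg ht]
  exact PySem.List.pyGetD_natCast ..

lemma pvMonoI {S : List Int} (hs : S.Pairwise (· ≤ ·)) {p q : Int}
    (hp : 0 ≤ p) (hpq : p ≤ q) (hq : q < (S.length : Int)) :
    PySem.List.pyGetD S p 0 ≤ PySem.List.pyGetD S q 0 := by
  rw [pvGetI hp, pvGetI (by omega)]
  exact pvMono hs (by omega) (by omega)

-- the while-loop: returns the left-maximal start r ∈ [i, j] (window valid, all k ∈ [i, r) too far)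
lemma advA_spec (S : List Int) (n j : Int) (hn : 0 < n) :
    ∀ (fuel : Nat) (i : Int), 0 ≤ i → i ≤ j → (j - i).toNat < fuel →
      i ≤ advA S n j i fuel ∧ advA S n j i fuel ≤ j ∧
      PySem.List.pyGetD S j 0 - PySem.List.pyGetD S (advA S n j i fuel) 0 < n ∧
      (∀ t : Int, i ≤ t → t < advA S n j i fuel →
        n ≤ PySem.List.pyGetD S j 0 - PySem.List.pyGetD S t 0) := by
  intro fuel
  induction fuel with
  | zero => intro i _ _ hf; exact absurd hf (Nat.not_lt_zero _)
  | succ fuel ih =>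
    intro i h0 hij hf
    by_cases hc : n ≤ PySem.List.pyGetD S j 0 - PySem.List.pyGetD S i 0
    · have hlt : i < j := by
        rcases lt_or_eq_of_le hij with h | h
        · exact h
        · subst h; omega
      have hrec := ih (i+1) (by omega) (by omega) (by omega)
      simp only [advA, if_pos hc]
      refine ⟨by omega, hrec.2.1, hrec.2.2.1, ?_⟩
      intro t ht1 ht2
      rcases lt_or_ge t (i+1) with h | h
      · have : t = i := by omega
        subst this; exact hc
      · exact hrec.2.2.2 t h ht2
    · simp only [advA, if_neg hc]
      exact ⟨le_rfl, hij, by omega, fun t ht1 ht2 => by omega⟩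

-- invariant of A's scan after the first m iterations
def pvInvA (S : List Int) (m : Nat) (st : Int × Int) : Prop :=
  0 ≤ st.1 ∧ st.1 ≤ (m : Int) ∧
  (∀ k j2 : Nat, (k : Int) < st.1 → j2 < S.length → m ≤ j2 + 1 →
    (S.length : Int) ≤ S.getD j2 0 - S.getD k 0) ∧
  pvCand S st.2 ∧ st.2 ≤ (S.length : Int) ∧
  (∀ i j : Nat, i ≤ j → j < m → S.getD j 0 - S.getD i 0 < (S.length : Int) →
    st.2 ≤ pvFval S i j)

lemma stepA_preserves (S : List Int) (hs : S.Pairwise (· ≤ ·)) (h2 : 2 ≤ S.length)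
    (m : Nat) (hm : m < S.length) (st : Int × Int) (hInv : pvInvA S m st) :
    pvInvA S (m+1) (stepA S st (m : Int)) := by
  obtain ⟨h01, h1m, hI2, hCand, hleN, hLB⟩ := hInv
  have hadv := advA_spec S (S.length : Int) (m : Int) (by omega) S.length st.1
    h01 (by exact_mod_cast h1m) (by omega)
  set iT := advA S (S.length : Int) (m : Int) st.1 S.length with hiT
  obtain ⟨hii, him, hwin, hseg⟩ := hadv
  have hiN : ((iT.toNat : Int)) = iT := Int.toNat_of_nonneg (by omega)
  have hgm : PySem.List.pyGetD S (m : Int) 0 = S.getD m 0 := PySem.List.pyGetD_natCast ..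
  have hgi : PySem.List.pyGetD S iT 0 = S.getD iT.toNat 0 := pvGetI (by omega)
  have hmaxL : ∀ k : Nat, (k : Int) < iT → (S.length : Int) ≤ S.getD m 0 - S.getD k 0 := by
    intro k hk
    rcases lt_or_ge (k : Int) st.1 with h | h
    · exact hI2 k m h hm (by omega)
    · have := hseg (k : Int) h hk
      rwa [hgm, PySem.List.pyGetD_natCast] at this
  have hwinN : S.getD m 0 - S.getD iT.toNat 0 < (S.length : Int) := by
    rw [← hgm, ← hgi]; exact hwin
  have hvalid : pvValid S iT.toNat m := ⟨by omega, hm, hwinN⟩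
  have hvalEq :
      (if (m : Int) - iT + 1 = (S.length : Int) - 1 ∧
          PySem.List.pyGetD S (m : Int) 0 - PySem.List.pyGetD S iT 0 = (S.length : Int) - 2
       then min st.2 2 else min st.2 ((S.length : Int) - ((m : Int) - iT + 1)))
      = min st.2 (pvFval S iT.toNat m) := by
    unfold pvFval
    rw [hgm, hgi, hiN]
    split_ifs <;> rfl
  show pvInvA S (m+1)
    (iT, if (m : Int) - iT + 1 = (S.length : Int) - 1 ∧
          PySem.List.pyGetD S (m : Int) 0 - PySem.List.pyGetD S iT 0 = (S.length : Int) - 2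
       then min st.2 2 else min st.2 ((S.length : Int) - ((m : Int) - iT + 1)))
  rw [hvalEq]
  refine ⟨by omega, by push_cast; omega, ?_, ?_, ?_, ?_⟩
  · intro k j2 hk hj2 hmj2
    have hkm := hmaxL k hk
    have hmono := pvMono hs (p := m) (q := j2) (by omega) hj2
    omega
  · rcases min_choice st.2 (pvFval S iT.toNat m) with h | h <;> rw [h]
    · exact hCand
    · exact Or.inr ⟨iT.toNat, m, hvalid, rfl⟩
  · exact le_trans (min_le_left _ _) hleN
  · intro p q hpq hqm1 hspan
    rcases lt_or_ge q m with h | h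
    · exact le_trans (min_le_left _ _) (hLB p q hpq h hspan)
    · have hqe : q = m := by omega
      subst hqe
      have hip : iT.toNat ≤ p := by
        by_contra hcon
        have : (p : Int) < iT := by omega
        have := hmaxL p this
        omega
      exact le_trans (min_le_right _ _) (pvFval_dom hvalid hip hpq (le_refl q))

lemma lowLoopA_good (S : List Int) (hs : S.Pairwise (· ≤ ·)) (h2 : 2 ≤ S.length) :
    pvGood S (lowLoopA S) := by
  have hAll : ∀ m : Nat, m ≤ S.length →
      pvInvA S m ((PySem.List.pyRange 0 (m : Int)).foldl (stepA S) (0, (S.length : Int))) := by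
    intro m
    induction m with
    | zero =>
      intro _
      rw [show ((0 : Nat) : Int) = 0 from rfl, PySem.List.pyRange_one_eq_nil (by omega),
        List.foldl_nil]
      exact ⟨le_rfl, by omega, fun k j2 hk _ _ => by omega, Or.inl rfl, le_rfl,
        fun i j _ hj _ => by omega⟩
    | succ m ih =>
      intro hm1
      rw [show ((m + 1 : Nat) : Int) = (m : Int) + 1 by push_cast; ring,
        PySem.List.pyRange_one_succ_right (by omega), List.foldl_append, List.foldl_cons,
        List.foldl_nil]
      exact stepA_preserves S hs h2 m (by omega) _ (ih (by omega))
  have hfin := hAll S.length le_rfl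
  obtain ⟨_, _, _, hCand, hleN, hLB⟩ := hfin
  exact ⟨hCand, hleN, fun i j hv => hLB i j hv.1 hv.2.1 hv.2.2⟩

-- ===== B-side lemmas =====

-- the binary search: returns the largest r ∈ [lo, hi] with S[r] ≤ x, given the invariant at entry
lemma bsearchB_spec (S : List Int) (hs : S.Pairwise (· ≤ ·)) (x : Int) :
    ∀ (fuel : Nat) (lo hi : Int), 0 ≤ lo → lo ≤ hi → hi < (S.length : Int) →
      (hi - lo).toNat < fuel →
      PySem.List.pyGetD S lo 0 ≤ x →
      (∀ t : Int, hi < t → t < (S.length : Int) → x < PySem.List.pyGetD S t 0) →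
      lo ≤ bsearchB S x lo hi fuel ∧ bsearchB S x lo hi fuel ≤ hi ∧
      PySem.List.pyGetD S (bsearchB S x lo hi fuel) 0 ≤ x ∧
      (∀ t : Int, bsearchB S x lo hi fuel < t → t < (S.length : Int) →
        x < PySem.List.pyGetD S t 0) := by
  intro fuel
  induction fuel with
  | zero => intro lo hi _ _ _ hf; exact absurd hf (Nat.not_lt_zero _)
  | succ fuel ih =>
    intro lo hi h0 hlh hhn hf hlo hhi
    by_cases hc : lo < hi
    · have hmid1 : lo + 1 ≤ PySem.Int.floordiv (lo + hi + 1) 2 := by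
        rw [PySem.Int.le_floordiv_iff_mul_le (by omega)]; omega
      have hmid2 : PySem.Int.floordiv (lo + hi + 1) 2 ≤ hi := by
        have := (PySem.Int.floordiv_lt_iff_lt_mul (a := lo + hi + 1)
          (b := 2) (q := hi + 1) (by omega)).mpr (by omega)
        omega
      by_cases hle : PySem.List.pyGetD S (PySem.Int.floordiv (lo + hi + 1) 2) 0 ≤ x
      · have hrec := ih (PySem.Int.floordiv (lo + hi + 1) 2) hi (by omega) (by omega)
          hhn (by omega) hle hhi
        simp only [bsearchB, if_pos hc, if_pos hle]
        exact ⟨by omega, hrec.2.1, hrec.2.2.1, hrec.2.2.2⟩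
      · have hrec := ih lo (PySem.Int.floordiv (lo + hi + 1) 2 - 1) h0 (by omega)
          (by omega) (by omega) hlo ?_
        · simp only [bsearchB, if_pos hc, if_neg hle]
          exact ⟨hrec.1, by omega, hrec.2.2.1, hrec.2.2.2⟩
        · intro t ht1 ht2
          rcases le_or_gt t hi with h | h
          · have : PySem.List.pyGetD S (PySem.Int.floordiv (lo + hi + 1) 2) 0 ≤
                PySem.List.pyGetD S t 0 :=
              pvMonoI hs (by omega) (by omega) (by omega)
            omega
          · exact hhi t h ht2
    · have : lo = hi := by omega
      simp only [bsearchB, if_neg hc]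
      exact ⟨le_rfl, hlh, hlo, fun t ht1 ht2 => hhi t (by omega) ht2⟩

-- Source B's count at anchor i is the size of the maximal valid window anchored at i
lemma pvCnt_spec (S : List Int) (hs : S.Pairwise (· ≤ ·)) (h2 : 2 ≤ S.length)
    (i : Nat) (hi : i < S.length) :
    ∃ j : Nat, pvValid S i j ∧ cntLoop S (i : Int) = (j : Int) - (i : Int) + 1 ∧
      ∀ q : Nat, q < S.length → S.getD q 0 ≤ S.getD i 0 + (S.length : Int) - 1 → q ≤ j := by
  have hgi : PySem.List.pyGetD S (i : Int) 0 = S.getD i 0 := PySem.List.pyGetD_natCast ..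
  have hbs := bsearchB_spec S hs (PySem.List.pyGetD S (i : Int) 0 + (S.length : Int) - 1)
    S.length (i : Int) ((S.length : Int) - 1) (by omega) (by omega) (by omega) (by omega)
    (by omega) (fun t ht1 ht2 => by omega)
  set r := bsearchB S (PySem.List.pyGetD S (i : Int) 0 + (S.length : Int) - 1)
    (i : Int) ((S.length : Int) - 1) S.length with hr
  obtain ⟨hir, hrn, hrx, hmax⟩ := hbs
  have hgr : PySem.List.pyGetD S r 0 = S.getD r.toNat 0 := pvGetI (by omega)
  refine ⟨r.toNat, ⟨by omega, by omega, by rw [← hgr, ← hgi]; omega⟩, ?_, ?_⟩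
  · unfold cntLoop
    rw [← hr]
    omega
  · intro q hq hqx
    by_contra hcon
    have hlt : r < (q : Int) := by omega
    have := hmax (q : Int) hlt (by omega)
    simp only [PySem.List.pyGetD_natCast] at this
    omega

-- the count kept by the outer loop is a (nonempty, maximal) valid window count
def pvCnt (S : List Int) (i : Nat) : Int := cntLoop S (i : Int)

lemma pvCnt_pos (S : List Int) (hs : S.Pairwise (· ≤ ·)) (h2 : 2 ≤ S.length)
    (i : Nat) (hi : i < S.length) : 1 ≤ pvCnt S i := by
  obtain ⟨j, hv, hc, _⟩ := pvCnt_spec S hs h2 i hi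
  unfold pvCnt
  rw [hc]
  have := hv.1
  omega

lemma pvCnt_le (S : List Int) (hs : S.Pairwise (· ≤ ·)) (h2 : 2 ≤ S.length)
    (i : Nat) (hi : i < S.length) : pvCnt S i ≤ (S.length : Int) := by
  obtain ⟨j, hv, hc, _⟩ := pvCnt_spec S hs h2 i hi
  unfold pvCnt
  rw [hc]
  have := hv.2.1
  omega

-- every valid window's stone count is at most the count anchored at its left stone
lemma pvWindow_le_cnt (S : List Int) (hs : S.Pairwise (· ≤ ·)) (h2 : 2 ≤ S.length)
    (p q : Nat) (hv : pvValid S p q) : ((q : Int) - (p : Int) + 1) ≤ pvCnt S p := by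
  obtain ⟨hpq, hq, hspan⟩ := hv
  obtain ⟨j, hjv, hc, hmax⟩ := pvCnt_spec S hs h2 p (by omega)
  have hqj : q ≤ j := hmax q hq (by omega)
  unfold pvCnt
  rw [hc]
  omega

lemma pvBest_spec (S : List Int) (hs : S.Pairwise (· ≤ ·)) (h2 : 2 ≤ S.length) :
    (∃ i : Nat, i < S.length ∧ bestLoop S = pvCnt S i) ∧
    (∀ i : Nat, i < S.length → pvCnt S i ≤ bestLoop S) ∧
    1 ≤ bestLoop S ∧ bestLoop S ≤ (S.length : Int) := by
  have hAll : ∀ m : Nat, m ≤ S.length →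
      ((((PySem.List.pyRange 0 (m : Int)).foldl
          (fun best i => let c := cntLoop S i; if c > best then c else best) 0) = 0 ∨
        ∃ i : Nat, i < m ∧ ((PySem.List.pyRange 0 (m : Int)).foldl
          (fun best i => let c := cntLoop S i; if c > best then c else best) 0) = pvCnt S i) ∧
       (∀ i : Nat, i < m → pvCnt S i ≤ ((PySem.List.pyRange 0 (m : Int)).foldl
          (fun best i => let c := cntLoop S i; if c > best then c else best) 0)) ∧
       ((PySem.List.pyRange 0 (m : Int)).foldl
          (fun best i => let c := cntLoop S i; if c > best then c else best) 0) ≤ (S.length : Int)) := by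
    intro m
    induction m with
    | zero =>
      intro _
      rw [show ((0 : Nat) : Int) = 0 from rfl, PySem.List.pyRange_one_eq_nil (by omega),
        List.foldl_nil]
      exact ⟨Or.inl rfl, fun i hi => absurd hi (Nat.not_lt_zero _), by omega⟩
    | succ m ih =>
      intro hm1
      rw [show ((m + 1 : Nat) : Int) = (m : Int) + 1 by push_cast; ring,
        PySem.List.pyRange_one_succ_right (by omega), List.foldl_append, List.foldl_cons,
        List.foldl_nil]
      obtain ⟨hach, hub, hle⟩ := ih (by omega)
      simp only [show cntLoop S ((m : Nat) : Int) = pvCnt S m from rfl]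
      set b := (PySem.List.pyRange 0 (m : Int)).foldl
          (fun best i => let c := cntLoop S i; if c > best then c else best) 0 with hb
      by_cases hc : pvCnt S m > b
      · simp only [if_pos hc]
        refine ⟨Or.inr ⟨m, by omega, rfl⟩, ?_, pvCnt_le S hs h2 m (by omega)⟩
        intro i hi
        rcases Nat.lt_or_ge i m with h | h
        · exact le_trans (hub i h) (by omega)
        · have : i = m := by omega
          subst this; exact le_rfl
      · simp only [if_neg hc]
        refine ⟨?_, ?_, hle⟩
        · rcases hach with h | ⟨i, hi, h⟩
          · exact Or.inl h
          · exact Or.inr ⟨i, by omega, h⟩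
        · intro i hi
          rcases Nat.lt_or_ge i m with h | h
          · exact hub i h
          · have : i = m := by omega
            subst this; omega
  obtain ⟨hach, hub, hle⟩ := hAll S.length le_rfl
  have h0 : 1 ≤ pvCnt S 0 := pvCnt_pos S hs h2 0 (by omega)
  have hb1 : 1 ≤ bestLoop S := le_trans h0 (hub 0 (by omega))
  rcases hach with h | ⟨i, hi, h⟩
  · exact absurd hb1 (by unfold bestLoop; rw [h]; omega)
  · exact ⟨⟨i, hi, h⟩, hub, hb1, hle⟩

lemma lowB_good (S : List Int) (hs : S.Pairwise (· ≤ ·)) (h2 : 2 ≤ S.length) :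
    pvGood S (lowB S) := by
  obtain ⟨⟨i0, hi0, hach⟩, hub, hb1, hbn⟩ := pvBest_spec S hs h2
  have hwin : ∀ p q : Nat, pvValid S p q → ((q : Int) - (p : Int) + 1) ≤ bestLoop S := by
    intro p q hv
    exact le_trans (pvWindow_le_cnt S hs h2 p q hv)
      (hub p (lt_of_le_of_lt hv.1 hv.2.1))
  obtain ⟨Q, hPQv, hPQc, _⟩ := pvCnt_spec S hs h2 i0 hi0
  have hPQbest : ((Q : Int) - (i0 : Int) + 1) = bestLoop S := by
    rw [← hPQc, hach]; rfl
  have hPle : i0 ≤ Q := hPQv.1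
  have hQlt : Q < S.length := hPQv.2.1
  have e0 : PySem.List.pyGetD S ((S.length : Int) - 2) 0 = S.getD (S.length - 2) 0 := by
    rw [pvGetI (by omega)]
    congr 1
    omega
  have e1 : PySem.List.pyGetD S ((S.length : Int) - 1) 0 = S.getD (S.length - 1) 0 := by
    rw [pvGetI (by omega)]
    congr 1
    omega
  have eg0 : PySem.List.pyGetD S (0 : Int) 0 = S.getD 0 0 := pvGetI (by omega)
  have eg1 : PySem.List.pyGetD S (1 : Int) 0 = S.getD 1 0 := pvGetI (by omega)
  unfold lowB
  simp only [e0, e1, eg0, eg1]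
  split_ifs with h1 h2' h3 h4
  -- case best = n : low = 0
  · have hf : (0 : Int) = pvFval S i0 Q := by
      unfold pvFval
      split_ifs with hc
      · omega
      · omega
    refine ⟨Or.inr ⟨i0, Q, hPQv, hf⟩, by omega, ?_⟩
    intro p q hv
    have hc := hwin p q hv
    obtain ⟨hpq, hql, _⟩ := hv
    unfold pvFval
    split_ifs <;> omega
  -- case best = n-1, window (1, len-1) gives 1
  · have hv1 : pvValid S 1 (S.length - 1) := ⟨by omega, by omega, by omega⟩
    have hf : (1 : Int) = pvFval S 1 (S.length - 1) := by
      unfold pvFval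
      split_ifs with hc
      · omega
      · omega
    refine ⟨Or.inr ⟨1, S.length - 1, hv1, hf⟩, by omega, ?_⟩
    intro p q hv
    have hc := hwin p q hv
    unfold pvFval
    split_ifs <;> omega
  -- case best = n-1, window (0, len-2) gives 1
  · have hv1 : pvValid S 0 (S.length - 2) := ⟨by omega, by omega, by omega⟩
    have hf : (1 : Int) = pvFval S 0 (S.length - 2) := by
      unfold pvFval
      split_ifs with hc
      · omega
      · omega
    refine ⟨Or.inr ⟨0, S.length - 2, hv1, hf⟩, by omega, ?_⟩
    intro p q hv
    have hc := hwin p q hv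
    unfold pvFval
    split_ifs <;> omega
  -- case best = n-1, both (n-1)-windows are tight: low = 2
  · push Not at h3 h4
    have hPQtwo : (i0 = 0 ∧ Q = S.length - 2) ∨ (i0 = 1 ∧ Q = S.length - 1) := by omega
    have hspan : ∀ p q : Nat, p ≤ q → q < S.length →
        ((q : Int) - (p : Int) + 1) = (S.length : Int) - 1 →
        S.getD q 0 - S.getD p 0 < (S.length : Int) →
        S.getD q 0 - S.getD p 0 = (S.length : Int) - 2 := by
      intro p q hpq hql hcnt hsp
      have : (p = 0 ∧ q = S.length - 2) ∨ (p = 1 ∧ q = S.length - 1) := by omega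
      rcases this with ⟨hp0, hq0⟩ | ⟨hp0, hq0⟩ <;> subst hp0 <;> subst hq0
      · exact h4 hsp
      · exact h3 hsp
    have hf : (2 : Int) = pvFval S i0 Q := by
      have hsp := hspan i0 Q hPle hQlt (by omega) hPQv.2.2
      unfold pvFval
      rw [if_pos ⟨by omega, hsp⟩]
    refine ⟨Or.inr ⟨i0, Q, hPQv, hf⟩, by omega, ?_⟩
    intro p q hv
    have hc := hwin p q hv
    obtain ⟨hpq, hql, hsp⟩ := hv
    unfold pvFval
    split_ifs with hcnd
    · omega
    · by_cases hcn : (q : Int) - (p : Int) + 1 = (S.length : Int) - 1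
      · have := hspan p q hpq hql hcn hsp
        exact absurd ⟨hcn, this⟩ hcnd
      · omega
  -- case best ≤ n-2 : low = n - best
  · have hf : (S.length : Int) - bestLoop S = pvFval S i0 Q := by
      unfold pvFval
      split_ifs with hc
      · omega
      · omega
    refine ⟨Or.inr ⟨i0, Q, hPQv, hf⟩, by omega, ?_⟩
    intro p q hv
    have hc := hwin p q hv
    unfold pvFval
    split_ifs with hcnd
    · omega
    · omega

-- ===== VERDICT (by name: the statement is the Claim_ definition above) =====
theorem numMovesStonesII_spec : Claim_equal_numMovesStonesII := by
  intro A _ hpre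
  unfold Spec_numMovesStonesII numMovesStonesII numMovesStonesII_alt
  have hs := PySem.List.sorted_pairwise A (fun x => x)
  have hlen : (PySem.List.sorted A (fun x => x)).length = A.length :=
    PySem.List.length_sorted ..
  have h2 : 2 ≤ (PySem.List.sorted A (fun x => x)).length := by
    rw [hlen]; exact hpre
  have hlow := pvGood_unique (lowLoopA_good _ hs h2) (lowB_good _ hs h2)
  simp only [highVal, hlow]
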